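-- pv_equiv track=rewrite | github.com/dirtysalt/codes | leetcode/hhrc2022-2.py | longestESR
-- ===== SOURCE A (Python) =====
-- from typing import List
--
-- def longestESR(sales: List[int]) -> int:
--     xs = [1 if x > 8 else -1 for x in sales]
--     n = len(xs)
--     pos = [-1] * (2 * n + 2)
--
--     acc = 0
--     for i in range(n):
--         acc += xs[i]
--         pos[(acc + n)] = i
--
--     for i in reversed(range(2 * n + 1)):
--         pos[i] = max(pos[i], pos[i + 1])
--
--     ans = 0
--     acc = 0
--     for i in range(n):
--         j = pos[(acc + 1 + n)]
--         dist = (j - i + 1)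
--         ans = max(ans, dist)
--         acc += xs[i]
--     return ans
-- ===== SOURCE B (Python) =====
-- from typing import List
--
-- def longestESR(sales: List[int]) -> int:
--     n = len(sales)
--     ans = 0
--     for i in range(n):
--         s = 0
--         for j in range(i, n):
--             s += 1 if sales[j] > 8 else -1
--             if s > 0:
--                 ans = max(ans, j - i + 1)
--     return ans
-- ===== Notes on version B (the rewrite author's own statement) =====
-- stated objective: simpler
-- what changed: Replaced A's three-pass scheme (last-occurrence position array indexed by shifted prefix sums, a suffix-max sweep, then a per-start lookup) by a direct two-loop scan that tracks the running window sum and takes the longest window with positive sum.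
import Mathlib
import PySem

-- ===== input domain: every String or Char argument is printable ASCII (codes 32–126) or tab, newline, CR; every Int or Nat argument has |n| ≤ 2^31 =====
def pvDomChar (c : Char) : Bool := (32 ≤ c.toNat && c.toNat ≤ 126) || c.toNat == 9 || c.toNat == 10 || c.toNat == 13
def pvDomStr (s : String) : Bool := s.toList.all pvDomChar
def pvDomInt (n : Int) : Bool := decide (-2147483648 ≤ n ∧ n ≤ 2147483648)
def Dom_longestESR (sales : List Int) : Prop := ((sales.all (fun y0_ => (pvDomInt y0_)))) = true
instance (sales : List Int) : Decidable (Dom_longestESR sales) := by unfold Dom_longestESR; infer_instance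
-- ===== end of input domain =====

-- B replaces A's three-pass position-array/suffix-max scheme by a direct scan of all
-- windows with a running window sum (simpler to read; not faster).

-- ===== PORT A =====
-- Literal port of A. Every list index below is provably in range, so `getD _ 0`
-- and `Int.toNat` render Python's indexing exactly on these inputs.
-- loop body of A's first loop: acc += xs[i]; pos[acc + n] = i
def pvBuild (xs : List Int) (n : Nat) (st : List Int × Int) (i : Nat) : List Int × Int :=
  let acc := st.2 + xs.getD i 0
  (st.1.set (acc + (n : Int)).toNat (i : Int), acc)

-- loop body of A's second loop: pos[i] = max(pos[i], pos[i+1])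
def pvSuffix (ps : List Int) (i : Nat) : List Int :=
  ps.set i (max (ps.getD i 0) (ps.getD (i + 1) 0))

-- loop body of A's third loop: j = pos[acc+1+n]; ans = max(ans, j-i+1); acc += xs[i]
def pvScan (pos2 : List Int) (n : Nat) (xs : List Int) (st : Int × Int) (i : Nat) : Int × Int :=
  let j := pos2.getD (st.2 + 1 + (n : Int)).toNat 0
  let dist := j - (i : Int) + 1
  (max st.1 dist, st.2 + xs.getD i 0)

def longestESR (sales : List Int) : Int :=
  let xs := sales.map (fun x => if x > 8 then (1 : Int) else -1)
  let n := xs.length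
  let pos0 : List Int := List.replicate (2 * n + 2) (-1)
  let st1 := (List.range n).foldl (pvBuild xs n) (pos0, 0)
  let pos2 := ((List.range (2 * n + 1)).reverse).foldl pvSuffix st1.1
  let st2 := (List.range n).foldl (pvScan pos2 n xs) (0, 0)
  st2.1

-- ===== PORT B =====
-- Port of B: for each start i, scan ends j with the running window sum s.
-- inner loop body: s += 1 if sales[j] > 8 else -1; if s > 0: ans = max(ans, j-i+1)
def pvInner (sales : List Int) (i : Nat) (st : Int × Int) (j : Nat) : Int × Int :=
  let s := st.2 + (if sales.getD j 0 > 8 then (1 : Int) else -1)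
  (if s > 0 then max st.1 ((j : Int) - (i : Int) + 1) else st.1, s)

-- outer loop body: the whole inner loop `for j in range(i, n)` starting from s = 0
def pvOuterF (sales : List Int) (ans : Int) (i : Nat) : Int :=
  ((List.range' i (sales.length - i)).foldl (pvInner sales i) (ans, 0)).1

def longestESR_alt (sales : List Int) : Int :=
  (List.range sales.length).foldl (pvOuterF sales) 0

-- ===== PRECONDITION & SPEC =====
def Spec_longestESR (sales : List Int) (out : Int) : Prop := out = longestESR_alt sales
instance (sales : List Int) (out : Int) : Decidable (Spec_longestESR sales out) := by unfold Spec_longestESR; infer_instance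

-- ===== CLAIM (what is proved, stated in full; the proofs are below) =====
def Claim_equal_longestESR : Prop := ∀ (sales : List Int), Dom_longestESR sales → Spec_longestESR sales (longestESR sales)

-- ===== LEMMAS AND PROOFS =====

-- the ±1 step and prefix sums of the mapped array
def pvStep (sales : List Int) (j : Nat) : Int := if sales.getD j 0 > 8 then 1 else -1

def pvP (sales : List Int) : Nat → Int
  | 0 => 0
  | (i + 1) => pvP sales i + pvStep sales i

-- [i..j] is a window with positive ±1-sum
def pvGood (sales : List Int) (i j : Nat) : Prop :=
  i ≤ j ∧ j < sales.length ∧ pvP sales i < pvP sales (j + 1)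

-- r is the length of the longest good window (0 if none)
def pvIsBest (sales : List Int) (r : Int) : Prop :=
  (r = 0 ∨ ∃ i j, pvGood sales i j ∧ r = (j : Int) - (i : Int) + 1) ∧
  ∀ i j, pvGood sales i j → (j : Int) - (i : Int) + 1 ≤ r

lemma pvGood_len {sales : List Int} {i j : Nat} (h : pvGood sales i j) :
    (1 : Int) ≤ (j : Int) - (i : Int) + 1 := by
  have := h.1
  have : (i : Int) ≤ (j : Int) := by exact_mod_cast this
  omega

lemma pvIsBest_nonneg {sales : List Int} {r : Int} (h : pvIsBest sales r) : 0 ≤ r := by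
  rcases h.1 with h0 | ⟨i, j, hg, he⟩
  · omega
  · have := pvGood_len hg; omega

lemma pvIsBest_unique {sales : List Int} {r s : Int}
    (hr : pvIsBest sales r) (hs : pvIsBest sales s) : r = s := by
  have h1 : r ≤ s := by
    rcases hr.1 with h0 | ⟨i, j, hg, he⟩
    · have := pvIsBest_nonneg hs; omega
    · have := hs.2 i j hg; omega
  have h2 : s ≤ r := by
    rcases hs.1 with h0 | ⟨i, j, hg, he⟩
    · have := pvIsBest_nonneg hr; omega
    · have := hr.2 i j hg; omega
  omega

lemma pvP_bound (sales : List Int) (i : Nat) :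
    -(i : Int) ≤ pvP sales i ∧ pvP sales i ≤ (i : Int) := by
  induction i with
  | zero => simp [pvP]
  | succ i ih =>
      have : pvStep sales i = 1 ∨ pvStep sales i = -1 := by
        unfold pvStep; split <;> simp
      rcases this with h | h <;> simp [pvP, h] <;> omega

lemma pvXs_getD (sales : List Int) {i : Nat} (h : i < sales.length) :
    (sales.map (fun x => if x > 8 then (1 : Int) else -1)).getD i 0 = pvStep sales i := by
  simp [pvStep, List.getD_eq_getElem?_getD, List.getElem?_map,
    List.getElem?_eq_getElem h, List.getD_eq_getElem?_getD]

lemma pvGetD_set {L : List Int} {u : Nat} (hu : u < L.length) (v : Int) (k : Nat) :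
    (L.set u v).getD k 0 = if u = k then v else L.getD k 0 := by
  by_cases hk : u = k
  · subst hk
    simp [List.getD_eq_getElem?_getD, hu]
  · simp [List.getD_eq_getElem?_getD, List.getElem?_set_ne hk, hk]

-- ---------- B side ----------

def pvInnerRun (sales : List Int) (i k m : Nat) (a : Int) : Int :=
  ((List.range' k m).foldl (pvInner sales i) (a, pvP sales k - pvP sales i)).1

lemma pvInnerRun_zero (sales : List Int) (i k : Nat) (a : Int) :
    pvInnerRun sales i k 0 a = a := rfl

lemma pvInnerRun_succ (sales : List Int) (i k m : Nat) (a : Int) :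
    pvInnerRun sales i k (m + 1) a =
      pvInnerRun sales i (k + 1) m
        (if pvP sales i < pvP sales (k + 1) then max a ((k : Int) - (i : Int) + 1) else a) := by
  have hs : pvP sales k - pvP sales i + (if sales.getD k 0 > 8 then (1 : Int) else -1)
      = pvP sales (k + 1) - pvP sales i := by
    simp only [pvP, pvStep]; ring
  have hc : (pvP sales (k + 1) - pvP sales i > 0) ↔ (pvP sales i < pvP sales (k + 1)) := by
    omega
  simp only [pvInnerRun, List.range'_succ, List.foldl_cons, pvInner, hs, hc]

lemma pvInnerRun_spec (sales : List Int) (i : Nat) :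
    ∀ (m k : Nat) (a : Int),
      (pvInnerRun sales i k m a = a ∨
        ∃ j, k ≤ j ∧ j < k + m ∧ pvP sales i < pvP sales (j + 1) ∧
          pvInnerRun sales i k m a = (j : Int) - (i : Int) + 1) ∧
      a ≤ pvInnerRun sales i k m a ∧
      ∀ j, k ≤ j → j < k + m → pvP sales i < pvP sales (j + 1) →
        (j : Int) - (i : Int) + 1 ≤ pvInnerRun sales i k m a := by
  intro m
  induction m with
  | zero =>
      intro k a
      refine ⟨Or.inl (pvInnerRun_zero _ _ _ _), le_of_eq (pvInnerRun_zero _ _ _ _).symm, ?_⟩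
      intro j h1 h2; omega
  | succ m ih =>
      intro k a
      rw [pvInnerRun_succ]
      set a' := (if pvP sales i < pvP sales (k + 1) then max a ((k : Int) - (i : Int) + 1) else a) with ha'
      obtain ⟨hex, hle, hbd⟩ := ih (k + 1) a'
      have haa' : a ≤ a' := by
        rw [ha']; split
        · exact le_max_left _ _
        · exact le_rfl
      refine ⟨?_, le_trans haa' hle, ?_⟩
      · rcases hex with h | ⟨j, hj1, hj2, hj3, hj4⟩
        · rw [h, ha']
          split
          · rcases max_choice a ((k : Int) - (i : Int) + 1) with hm | hm
            · exact Or.inl hm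
            · exact Or.inr ⟨k, le_rfl, by omega, by assumption, hm⟩
          · exact Or.inl rfl
        · exact Or.inr ⟨j, by omega, by omega, hj3, hj4⟩
      · intro j hj1 hj2 hj3
        by_cases hjk : k + 1 ≤ j
        · exact hbd j hjk (by omega) hj3
        · have hjeq : j = k := by omega
          subst hjeq
          have : (j : Int) - (i : Int) + 1 ≤ a' := by
            rw [ha']; rw [if_pos hj3]; exact le_max_right _ _
          exact le_trans this hle

lemma pvOuterF_eq (sales : List Int) (a : Int) (i : Nat) :
    pvOuterF sales a i = pvInnerRun sales i i (sales.length - i) a := by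
  simp [pvOuterF, pvInnerRun]

def pvOuterRun (sales : List Int) (t m : Nat) (a : Int) : Int :=
  (List.range' t m).foldl (pvOuterF sales) a

lemma pvOuterRun_spec (sales : List Int) :
    ∀ (m t : Nat) (a : Int), t + m = sales.length →
      (pvOuterRun sales t m a = a ∨
        ∃ i j, t ≤ i ∧ pvGood sales i j ∧ pvOuterRun sales t m a = (j : Int) - (i : Int) + 1) ∧
      a ≤ pvOuterRun sales t m a ∧
      ∀ i j, t ≤ i → pvGood sales i j →
        (j : Int) - (i : Int) + 1 ≤ pvOuterRun sales t m a := by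
  intro m
  induction m with
  | zero =>
      intro t a ht
      refine ⟨Or.inl rfl, le_rfl, ?_⟩
      intro i j h1 hg
      exact absurd hg.2.1 (by have := hg.1; omega)
  | succ m ih =>
      intro t a ht
      have hrun : pvOuterRun sales t (m + 1) a
          = pvOuterRun sales (t + 1) m (pvOuterF sales a t) := by
        simp [pvOuterRun, List.range'_succ]
      have htn : t + (sales.length - t) = sales.length := by omega
      obtain ⟨iex, ile, ibd⟩ := pvInnerRun_spec sales t (sales.length - t) t a
      obtain ⟨hex, hle, hbd⟩ := ih (t + 1) (pvOuterF sales a t) (by omega)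
      rw [hrun]
      have hfa : pvOuterF sales a t = pvInnerRun sales t t (sales.length - t) a :=
        pvOuterF_eq sales a t
      refine ⟨?_, ?_, ?_⟩
      · rcases hex with h | ⟨i, j, hi, hg, he⟩
        · rw [h, hfa]
          rcases iex with h2 | ⟨j, hj1, hj2, hj3, hj4⟩
          · exact Or.inl h2
          · exact Or.inr ⟨t, j, le_rfl, ⟨hj1, by omega, hj3⟩, hj4⟩
        · exact Or.inr ⟨i, j, by omega, hg, he⟩
      · calc a ≤ pvOuterF sales a t := by rw [hfa]; exact ile
          _ ≤ _ := hle
      · intro i j hi hg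
        by_cases hit : t + 1 ≤ i
        · exact hbd i j hit hg
        · have : i = t := by omega
          subst this
          have h1 : (j : Int) - (i : Int) + 1 ≤ pvOuterF sales a i := by
            rw [hfa]
            exact ibd j hg.1 (by have := hg.2.1; omega) hg.2.2
          exact le_trans h1 hle

lemma altIsBest (sales : List Int) : pvIsBest sales (longestESR_alt sales) := by
  have he : longestESR_alt sales = pvOuterRun sales 0 sales.length 0 := by
    simp [longestESR_alt, pvOuterRun, List.range_eq_range']
  obtain ⟨hex, hle, hbd⟩ := pvOuterRun_spec sales sales.length 0 0 (by omega)
  constructor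
  · rw [he]
    rcases hex with h | ⟨i, j, _, hg, hv⟩
    · exact Or.inl h
    · exact Or.inr ⟨i, j, hg, hv⟩
  · intro i j hg
    rw [he]
    exact hbd i j (Nat.zero_le _) hg

-- ---------- A side ----------

def pvXs (sales : List Int) : List Int := sales.map (fun x => if x > 8 then (1 : Int) else -1)

def pvB1 (sales : List Int) (t : Nat) : List Int × Int :=
  (List.range t).foldl (pvBuild (pvXs sales) sales.length)
    (List.replicate (2 * sales.length + 2) (-1), 0)

def pvPos2 (sales : List Int) (m : Nat) : List Int :=
  ((List.range' (2 * sales.length + 1 - m) m).reverse).foldl pvSuffix (pvB1 sales sales.length).1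

def pvScanRun (sales : List Int) (t : Nat) : Int × Int :=
  (List.range t).foldl
    (pvScan (pvPos2 sales (2 * sales.length + 1)) sales.length (pvXs sales)) (0, 0)

lemma pvA_eq (sales : List Int) : longestESR sales = (pvScanRun sales sales.length).1 := by
  simp [longestESR, pvScanRun, pvB1, pvPos2, pvXs, List.length_map, List.range_eq_range']

-- exact characterization of pos after the first loop (restricted to the first t steps)
def pvQe (sales : List Int) (t k : Nat) (v : Int) : Prop :=
  (v = -1 ∨ ∃ i, i < t ∧ pvP sales (i + 1) + sales.length = (k : Int) ∧ v = (i : Int)) ∧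
  ∀ i, i < t → pvP sales (i + 1) + sales.length = (k : Int) → (i : Int) ≤ v

-- characterization of pos after the suffix-max pass
def pvQ (sales : List Int) (k : Nat) (v : Int) : Prop :=
  (v = -1 ∨ ∃ i, i < sales.length ∧ (k : Int) ≤ pvP sales (i + 1) + sales.length ∧ v = (i : Int)) ∧
  ∀ i, i < sales.length → (k : Int) ≤ pvP sales (i + 1) + sales.length → (i : Int) ≤ v

lemma pvB1_succ (sales : List Int) (t : Nat) :
    pvB1 sales (t + 1) = pvBuild (pvXs sales) sales.length (pvB1 sales t) t := by
  simp [pvB1, List.range_succ, List.foldl_append]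

lemma pvB1_spec (sales : List Int) :
    ∀ t, t ≤ sales.length →
      (pvB1 sales t).1.length = 2 * sales.length + 2 ∧
      (pvB1 sales t).2 = pvP sales t ∧
      ∀ k, k < 2 * sales.length + 2 → pvQe sales t k ((pvB1 sales t).1.getD k 0) := by
  intro t
  induction t with
  | zero =>
      intro _
      refine ⟨by simp [pvB1], by simp [pvB1, pvP], ?_⟩
      intro k hk
      have hv : (pvB1 sales 0).1.getD k 0 = -1 := by
        simp [pvB1, List.getD_eq_getElem?_getD, hk]
      rw [hv]
      exact ⟨Or.inl rfl, fun i hi _ => absurd hi (by omega)⟩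
  | succ t ih =>
      intro ht
      obtain ⟨hlen, hsnd, hQ⟩ := ih (by omega)
      have htn : t < sales.length := by omega
      have hstep : (pvXs sales).getD t 0 = pvStep sales t := pvXs_getD sales htn
      have hacc : (pvB1 sales t).2 + (pvXs sales).getD t 0 = pvP sales (t + 1) := by
        rw [hsnd, hstep]; rfl
      have hb := pvP_bound sales (t + 1)
      have hz0 : 0 ≤ pvP sales (t + 1) + (sales.length : Int) := by
        have : ((t : Int) + 1) ≤ (sales.length : Int) := by exact_mod_cast ht
        omega
      have hu : ((pvP sales (t + 1) + (sales.length : Int)).toNat : Int)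
          = pvP sales (t + 1) + (sales.length : Int) := Int.toNat_of_nonneg hz0
      have hulen : (pvP sales (t + 1) + (sales.length : Int)).toNat < 2 * sales.length + 2 := by
        have : ((t : Int) + 1) ≤ (sales.length : Int) := by exact_mod_cast ht
        omega
      have hform : pvB1 sales (t + 1)
          = ((pvB1 sales t).1.set (pvP sales (t + 1) + (sales.length : Int)).toNat (t : Int),
              pvP sales (t + 1)) := by
        rw [pvB1_succ]
        simp only [pvBuild, hacc]
      rw [hform]
      refine ⟨by simp [hlen], rfl, ?_⟩
      intro k hk
      have hset := pvGetD_set (L := (pvB1 sales t).1)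
          (u := (pvP sales (t + 1) + (sales.length : Int)).toNat)
          (by rw [hlen]; exact hulen) ((t : Int)) k
      rw [hset]
      by_cases hk' : (pvP sales (t + 1) + (sales.length : Int)).toNat = k
      · rw [if_pos hk']
        constructor
        · exact Or.inr ⟨t, by omega, by omega, rfl⟩
        · intro i hi _
          exact_mod_cast Nat.lt_succ_iff.mp hi
      · rw [if_neg hk']
        obtain ⟨hQ1, hQ2⟩ := hQ k hk
        constructor
        · rcases hQ1 with h | ⟨i, hi, he, hv⟩
          · exact Or.inl h
          · exact Or.inr ⟨i, by omega, he, hv⟩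
        · intro i hi he
          rcases Nat.lt_succ_iff_lt_or_eq.mp hi with hi' | hi'
          · exact hQ2 i hi' he
          · subst hi'
            exact absurd (by omega : (pvP sales (i + 1) + (sales.length : Int)).toNat = k) hk' 

lemma pvPos2_zero (sales : List Int) : pvPos2 sales 0 = (pvB1 sales sales.length).1 := rfl

lemma pvPos2_succ (sales : List Int) (m : Nat) (h : m + 1 ≤ 2 * sales.length + 1) :
    pvPos2 sales (m + 1) = pvSuffix (pvPos2 sales m) (2 * sales.length - m) := by
  have h1 : 2 * sales.length + 1 - (m + 1) = 2 * sales.length - m := by omega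
  have h2 : 2 * sales.length - m + 1 = 2 * sales.length + 1 - m := by omega
  rw [pvPos2, h1, List.range'_succ, h2, List.reverse_cons, List.foldl_append]
  rfl

lemma pvPos2_spec (sales : List Int) :
    ∀ m, m ≤ 2 * sales.length + 1 →
      (pvPos2 sales m).length = 2 * sales.length + 2 ∧
      ∀ k, k < 2 * sales.length + 2 →
        (2 * sales.length + 1 - m ≤ k → pvQ sales k ((pvPos2 sales m).getD k 0)) ∧
        (k < 2 * sales.length + 1 - m →
          (pvPos2 sales m).getD k 0 = (pvB1 sales sales.length).1.getD k 0) := by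
  intro m
  induction m with
  | zero =>
      intro _
      obtain ⟨hlen, _, hQ⟩ := pvB1_spec sales sales.length le_rfl
      rw [pvPos2_zero]
      refine ⟨hlen, ?_⟩
      intro k hk
      refine ⟨?_, fun _ => rfl⟩
      intro hreg
      have hk' : k = 2 * sales.length + 1 := by omega
      subst hk'
      obtain ⟨h1, h2⟩ := hQ (2 * sales.length + 1) hk
      constructor
      · rcases h1 with h | ⟨i, hi, he, hv⟩
        · exact Or.inl h
        · exact absurd he (by have hb := pvP_bound sales (i + 1); push_cast; omega)
      · intro i hi he
        exact absurd he (by have hb := pvP_bound sales (i + 1); push_cast; omega)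
  | succ m ih =>
      intro hm
      obtain ⟨hlen, hk⟩ := ih (by omega)
      obtain ⟨hlenB, _, hQe⟩ := pvB1_spec sales sales.length le_rfl
      have ha1 : 2 * sales.length - m < 2 * sales.length + 2 := by omega
      have ha2 : 2 * sales.length - m + 1 < 2 * sales.length + 2 := by omega
      rw [pvPos2_succ sales m hm]
      have hva : (pvPos2 sales m).getD (2 * sales.length - m) 0
          = (pvB1 sales sales.length).1.getD (2 * sales.length - m) 0 :=
        (hk (2 * sales.length - m) ha1).2 (by omega)
      have hva1 : pvQ sales (2 * sales.length - m + 1)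
          ((pvPos2 sales m).getD (2 * sales.length - m + 1) 0) :=
        (hk (2 * sales.length - m + 1) ha2).1 (by omega)
      rw [pvSuffix]
      refine ⟨by simpa using hlen, ?_⟩
      intro k hkk
      have hset := pvGetD_set (L := pvPos2 sales m) (u := 2 * sales.length - m)
          (by rw [hlen]; exact ha1)
          (max ((pvPos2 sales m).getD (2 * sales.length - m) 0)
            ((pvPos2 sales m).getD (2 * sales.length - m + 1) 0)) k
      constructor
      · intro hge
        rw [hset]
        by_cases hak : 2 * sales.length - m = k
        · rw [if_pos hak]
          obtain ⟨he1, hb1⟩ := hQe (2 * sales.length - m) ha1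
          obtain ⟨he2, hb2⟩ := hva1
          subst hak
          constructor
          · rcases max_choice ((pvPos2 sales m).getD (2 * sales.length - m) 0)
                ((pvPos2 sales m).getD (2 * sales.length - m + 1) 0) with hmx | hmx
            · rw [hmx, hva]
              rcases he1 with h | ⟨i, hi, he, hv⟩
              · exact Or.inl h
              · exact Or.inr ⟨i, hi, by omega, hv⟩
            · rw [hmx]
              rcases he2 with h | ⟨i, hi, he, hv⟩
              · exact Or.inl h
              · exact Or.inr ⟨i, hi, by push_cast at he ⊢; omega, hv⟩
          · intro i hi hik
            by_cases heq : pvP sales (i + 1) + (sales.length : Int) = ((2 * sales.length - m : Nat) : Int)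
            · have h1 : (i : Int) ≤ (pvPos2 sales m).getD (2 * sales.length - m) 0 := by
                rw [hva]; exact hb1 i hi heq
              exact le_trans h1 (le_max_left _ _)
            · have h2 : ((2 * sales.length - m + 1 : Nat) : Int) ≤ pvP sales (i + 1) + (sales.length : Int) := by
                push_cast at hik heq ⊢; omega
              exact le_trans (hb2 i hi h2) (le_max_right _ _)
        · rw [if_neg hak]
          exact (hk k hkk).1 (by omega)
      · intro hlt
        rw [hset, if_neg (by omega)]
        exact (hk k hkk).2 (by omega)

-- value looked up for start i in the final loop
def pvDist (sales : List Int) (i : Nat) : Int :=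
  (pvPos2 sales (2 * sales.length + 1)).getD (pvP sales i + 1 + (sales.length : Int)).toNat 0
    - (i : Int) + 1

lemma pvScanRun_succ (sales : List Int) (t : Nat) :
    pvScanRun sales (t + 1)
      = pvScan (pvPos2 sales (2 * sales.length + 1)) sales.length (pvXs sales)
          (pvScanRun sales t) t := by
  simp [pvScanRun, List.range_succ, List.foldl_append]

lemma pvScanRun_spec (sales : List Int) :
    ∀ t, t ≤ sales.length →
      (pvScanRun sales t).2 = pvP sales t ∧
      0 ≤ (pvScanRun sales t).1 ∧
      ((pvScanRun sales t).1 = 0 ∨ ∃ i, i < t ∧ (pvScanRun sales t).1 = pvDist sales i) ∧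
      ∀ i, i < t → pvDist sales i ≤ (pvScanRun sales t).1 := by
  intro t
  induction t with
  | zero =>
      intro _
      exact ⟨rfl, le_refl 0, Or.inl rfl, fun i hi => absurd hi (by omega)⟩
  | succ t ih =>
      intro ht
      obtain ⟨hsnd, hnn, hex, hbd⟩ := ih (by omega)
      have htn : t < sales.length := by omega
      have hform : pvScanRun sales (t + 1)
          = (max (pvScanRun sales t).1 (pvDist sales t), pvP sales (t + 1)) := by
        rw [pvScanRun_succ]
        simp only [pvScan, pvDist, hsnd]
        have hx : (pvXs sales).getD t 0 = pvStep sales t := pvXs_getD sales htn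
        rw [hx]
        rfl
      rw [hform]
      refine ⟨rfl, le_trans hnn (le_max_left _ _), ?_, ?_⟩
      · rcases max_choice (pvScanRun sales t).1 (pvDist sales t) with hmx | hmx
        · rw [hmx]
          rcases hex with h | ⟨i, hi, hv⟩
          · exact Or.inl h
          · exact Or.inr ⟨i, by omega, hv⟩
        · exact Or.inr ⟨t, by omega, hmx⟩
      · intro i hi
        rcases Nat.lt_succ_iff_lt_or_eq.mp hi with h | h
        · exact le_trans (hbd i h) (le_max_left _ _)
        · exact h ▸ le_max_right _ _

lemma aIsBest (sales : List Int) : pvIsBest sales (longestESR sales) := by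
  obtain ⟨hsnd, hnn, hex, hbd⟩ := pvScanRun_spec sales sales.length le_rfl
  obtain ⟨hlen2, hQk⟩ := pvPos2_spec sales (2 * sales.length + 1) le_rfl
  rw [pvA_eq]
  have key : ∀ i, i < sales.length →
      pvQ sales (pvP sales i + 1 + (sales.length : Int)).toNat
        ((pvPos2 sales (2 * sales.length + 1)).getD
          (pvP sales i + 1 + (sales.length : Int)).toNat 0)
      ∧ (((pvP sales i + 1 + (sales.length : Int)).toNat : Int)
          = pvP sales i + 1 + (sales.length : Int)) := by
    intro i hi
    have hb := pvP_bound sales i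
    have h0 : 0 ≤ pvP sales i + 1 + (sales.length : Int) := by omega
    have hcast := Int.toNat_of_nonneg h0
    have hlt : (pvP sales i + 1 + (sales.length : Int)).toNat < 2 * sales.length + 2 := by omega
    exact ⟨(hQk _ hlt).1 (by omega), hcast⟩
  constructor
  · rcases hex with h | ⟨i, hi, hv⟩
    · exact Or.inl h
    · obtain ⟨⟨hQ1, hQ2⟩, hcast⟩ := key i hi
      rcases hQ1 with hneg | ⟨j, hj, hge, hvj⟩
      · left
        rw [pvDist, hneg] at hv
        omega
      · have hgood : pvP sales i < pvP sales (j + 1) := by omega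
        by_cases hij : i ≤ j
        · exact Or.inr ⟨i, j, ⟨hij, hj, hgood⟩, by rw [pvDist, hvj] at hv; exact hv⟩
        · left
          rw [pvDist, hvj] at hv
          have : (j : Int) < (i : Int) := by exact_mod_cast Nat.lt_of_not_le hij
          omega
  · intro i j hg
    obtain ⟨hij, hjl, hP⟩ := hg
    have hi : i < sales.length := lt_of_le_of_lt hij hjl
    obtain ⟨⟨hQ1, hQ2⟩, hcast⟩ := key i hi
    have hjv := hQ2 j hjl (by omega)
    have hdist := hbd i hi
    rw [pvDist] at hdist
    omega

-- ===== VERDICT (by name: the statement is the Claim_ definition above) =====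
theorem longestESR_spec : Claim_equal_longestESR := by
  intro sales _
  unfold Spec_longestESR
  exact pvIsBest_unique (aIsBest sales) (altIsBest sales)
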